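-- pv_equiv track=rewrite | github.com/asreview/asreview | asreview/simulation/readers.py | get_num_reviewed
-- ===== SOURCE A (Python) =====
-- def get_num_reviewed(results):
--     """ Get the number of queries from the non-reordered results. """
--     num_reviewed = []
--     for filename in results:
--         cur_num = []
--         for query in results[filename]["results"]:
--             # Count the number of labeled samples each query.
--             d_num = len(query["labelled"])
--             if len(cur_num) == 0:
--                 cur_num.append(d_num)
--             else:
--                 cur_num.append(d_num + cur_num[-1])
--         # Assert that the number of queries is the same for all files.
--         if len(num_reviewed) == 0 or len(cur_num) > len(num_reviewed):
--             num_reviewed = cur_num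
--     return num_reviewed
-- ===== SOURCE B (Python) =====
-- def get_num_reviewed(results):
--     """ Get the number of queries from the non-reordered results. """
--     # Two phases: pick the file with the most queries (first one on ties,
--     # matching A's strictly-greater replacement rule), then compute the
--     # cumulative labelled counts for that single file.
--     if not results:
--         return []
--     best = max(results, key=lambda f: len(results[f]["results"]))
--     num_reviewed = []
--     total = 0
--     for query in results[best]["results"]:
--         total += len(query["labelled"])
--         num_reviewed.append(total)
--     return num_reviewed
-- ===== Notes on version B (the rewrite author's own statement) =====
-- stated objective: simpler
-- what changed: A interleaves building a prefix-sum list for every file with keep-the-longest bookkeeping; B first picks the file with the most queries (first wins on ties, comparing only lengths) and then does a single running-total pass over that one file.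
import Mathlib
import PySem

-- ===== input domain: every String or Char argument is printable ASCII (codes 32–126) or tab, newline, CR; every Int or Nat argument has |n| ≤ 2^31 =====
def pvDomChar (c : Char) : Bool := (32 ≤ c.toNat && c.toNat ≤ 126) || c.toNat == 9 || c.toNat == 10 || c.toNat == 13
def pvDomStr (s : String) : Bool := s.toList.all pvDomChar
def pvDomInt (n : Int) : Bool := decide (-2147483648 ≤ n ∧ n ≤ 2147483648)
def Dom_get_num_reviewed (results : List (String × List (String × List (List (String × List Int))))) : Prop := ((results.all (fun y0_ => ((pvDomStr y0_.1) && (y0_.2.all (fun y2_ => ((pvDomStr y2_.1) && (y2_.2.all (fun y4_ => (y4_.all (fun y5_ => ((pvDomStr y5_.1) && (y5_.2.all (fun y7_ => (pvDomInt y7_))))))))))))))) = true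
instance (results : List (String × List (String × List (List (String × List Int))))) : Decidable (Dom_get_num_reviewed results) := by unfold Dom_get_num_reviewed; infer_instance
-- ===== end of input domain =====

-- B splits A's interleaved bookkeeping into two passes: pick the file with the most
-- queries first, then one running-total pass over that file only (objective: simpler).

-- ===== PORT A =====
-- inner loop body: cur_num.append(d_num) / cur_num.append(d_num + cur_num[-1])
def pvStepA (cur : List Int) (query : List (String × List Int)) : List Int :=
  let d_num : Int := ((List.lookup "labelled" query).getD []).length  -- query["labelled"]; KeyError (missing key) excluded by Pre_
  if cur.length = 0 then cur ++ [d_num]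
  else cur ++ [d_num + (PySem.List.pyGet? cur (-1)).getD 0]           -- cur_num[-1]; cur is nonempty in this branch

def pvCurNum_A (queries : List (List (String × List Int))) : List Int :=
  queries.foldl pvStepA []

def get_num_reviewed (results : List (String × List (String × List (List (String × List Int))))) : List Int :=
  results.foldl (fun num_reviewed p =>
    let file := (List.lookup p.1 results).getD []          -- results[filename]; the key comes from the iteration, so present
    let queries := (List.lookup "results" file).getD []    -- file["results"]; KeyError (missing key) excluded by Pre_
    let cur_num := pvCurNum_A queries
    if num_reviewed.length = 0 ∨ cur_num.length > num_reviewed.length then cur_num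
    else num_reviewed) []

-- ===== PORT B =====
-- results[f]["results"] (both KeyErrors excluded by Pre_)
def pvQueriesOf_B (results : List (String × List (String × List (List (String × List Int))))) (f : String) : List (List (String × List Int)) :=
  (List.lookup "results" ((List.lookup f results).getD [])).getD []

-- loop body: total += len(query["labelled"]); num_reviewed.append(total)
def pvStepB (st : List Int × Int) (query : List (String × List Int)) : List Int × Int :=
  let total := st.2 + (((List.lookup "labelled" query).getD []).length : Int)
  (st.1 ++ [total], total)

def get_num_reviewed_alt (results : List (String × List (String × List (List (String × List Int))))) : List Int :=
  match PySem.List.max? (results.map Prod.fst) (fun f => ((pvQueriesOf_B results f).length : Int)) with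
  | none => []          -- "if not results: return []"
  | some best => ((pvQueriesOf_B results best).foldl pvStepB ([], 0)).1

-- ===== PRECONDITION & SPEC =====
-- Pre_ excludes exactly the inputs where Python A raises KeyError: a file dict without
-- a "results" key, or a query dict without a "labelled" key.
def Pre_get_num_reviewed (results : List (String × List (String × List (List (String × List Int))))) : Prop :=
  ∀ p ∈ results,
    (List.lookup "results" ((List.lookup p.1 results).getD [])).isSome = true ∧
    ∀ q ∈ (List.lookup "results" ((List.lookup p.1 results).getD [])).getD [],
      (List.lookup "labelled" q).isSome = true
instance (results : List (String × List (String × List (List (String × List Int))))) : Decidable (Pre_get_num_reviewed results) := by unfold Pre_get_num_reviewed; infer_instance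

def pvWitness_get_num_reviewed : (List (String × List (String × List (List (String × List Int))))) :=
  [("a", [("results", [[("labelled", [1, 2])], [("labelled", [])]])]),
   ("b", [("results", [[("labelled", [7])]])])]

def Spec_get_num_reviewed (results : List (String × List (String × List (List (String × List Int))))) (out : List Int) : Prop := out = get_num_reviewed_alt results
instance (results : List (String × List (String × List (List (String × List Int))))) (out : List Int) : Decidable (Spec_get_num_reviewed results out) := by unfold Spec_get_num_reviewed; infer_instance

-- ===== CLAIM (what is proved, stated in full; the proofs are below) =====
def Claim_equal_get_num_reviewed : Prop := ∀ (results : List (String × List (String × List (List (String × List Int))))), Dom_get_num_reviewed results → Pre_get_num_reviewed results → Spec_get_num_reviewed results (get_num_reviewed results)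

-- ===== LEMMAS AND PROOFS =====

-- proof-side names for the two fold bodies of the outer selection loops
def pvSel (g : String → List Int) (num : List Int) (f : String) : List Int :=
  if (g f).length > num.length then g f else num
def pvMax (k : String → Int) (acc : Option String) (x : String) : Option String :=
  acc.elim (some x) (fun m => if k m < k x then some x else some m)

lemma pv_pyGet_last (x : Int) (xs : List Int) :
    (PySem.List.pyGet? (x :: xs) (-1)).getD 0 = (x :: xs).getLast?.getD 0 := by
  simp [PySem.List.pyGet?, PySem.List.pyIdx?]
  rw [List.getLast?_eq_some_getLast (by simp), List.getLast_eq_getElem]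
  simp
  rfl

-- A's prefix-sum loop equals B's running-total loop (generalized over the accumulator).
lemma pv_pref_eq (qs : List (List (String × List Int))) :
    ∀ (cur : List Int) (t : Int), cur.getLast?.getD 0 = t →
      qs.foldl pvStepA cur = (qs.foldl pvStepB (cur, t)).1 := by
  induction qs with
  | nil => intro cur t _; rfl
  | cons q qs ih =>
      intro cur t ht
      have hB : pvStepB (cur, t) q
          = (cur ++ [t + (((List.lookup "labelled" q).getD []).length : Int)],
             t + (((List.lookup "labelled" q).getD []).length : Int)) := rfl
      have hA : pvStepA cur q
          = cur ++ [t + (((List.lookup "labelled" q).getD []).length : Int)] := by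
        cases cur with
        | nil =>
            simp at ht
            simp [pvStepA, ← ht]
        | cons x xs =>
            simp only [pvStepA, List.length_cons, pv_pyGet_last, ht]
            simp [Int.add_comm]
      simp only [List.foldl_cons, hA, hB]
      exact ih _ _ (by simp)

lemma pv_len_curNum_go (qs : List (List (String × List Int))) :
    ∀ cur : List Int, (qs.foldl pvStepA cur).length = cur.length + qs.length := by
  induction qs with
  | nil => intro cur; simp
  | cons q qs ih =>
      intro cur
      have h1 : (pvStepA cur q).length = cur.length + 1 := by
        unfold pvStepA; split <;> simp
      simp only [List.foldl_cons, ih, h1, List.length_cons]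
      omega

lemma pv_len_curNum (qs : List (List (String × List Int))) :
    (pvCurNum_A qs).length = qs.length := by
  simpa using pv_len_curNum_go qs []

-- A's "keep-or-replace" test equals the strictly-longer test, value-wise.
lemma pv_step_merge (g : String → List Int) :
    (fun (num : List Int) (f : String) =>
      if num.length = 0 ∨ (g f).length > num.length then g f else num) = pvSel g := by
  funext num f
  unfold pvSel
  rcases num with _ | ⟨x, xs⟩
  · by_cases hf : (g f).length > 0
    · simp [hf]
    · have : g f = [] := by
        cases hgf : g f <;> simp_all
      simp [this]
  · simp

-- the fold pvMax starting from `some` stays `some`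
lemma pv_max_some (k : String → Int) :
    ∀ (t : List String) (m : String), ∃ b, t.foldl (pvMax k) (some m) = some b := by
  intro t
  induction t with
  | nil => exact fun m => ⟨m, rfl⟩
  | cons x t ih =>
      intro m
      show ∃ b, t.foldl (pvMax k) (pvMax k (some m) x) = some b
      rw [show pvMax k (some m) x = if k m < k x then some x else some m from rfl]
      split <;> exact ih _

-- the argmax fold: keep-if-strictly-longer over g equals g of the first key-maximal element
lemma pv_argmax_go (g : String → List Int) (k : String → Int)
    (h : ∀ f, ((g f).length : Int) = k f) :
    ∀ (l : List String) (m : String),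
      l.foldl (pvSel g) (g m) = (l.foldl (pvMax k) (some m)).elim [] g := by
  intro l
  induction l with
  | nil => intro m; rfl
  | cons f t ih =>
      intro m
      have hsel : pvSel g (g m) f = g (if k m < k f then f else m) := by
        have hm := h m; have hf := h f
        unfold pvSel
        by_cases hc : k m < k f
        · rw [if_pos (by omega), if_pos hc]
        · rw [if_neg (by omega), if_neg hc]
      have hmax : pvMax k (some m) f = some (if k m < k f then f else m) := by
        rw [show pvMax k (some m) f = if k m < k f then some f else some m from rfl]
        split <;> rfl
      simp only [List.foldl_cons, hsel, hmax]
      exact ih _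

-- abbreviations for the two per-filename functions of the outer loops
def pvG (results : List (String × List (String × List (List (String × List Int))))) (f : String) : List Int :=
  pvCurNum_A (pvQueriesOf_B results f)
def pvK (results : List (String × List (String × List (List (String × List Int))))) (f : String) : Int :=
  ((pvQueriesOf_B results f).length : Int)

-- ===== VERDICT (by name: the statement is the Claim_ definition above) =====
theorem get_num_reviewed_spec : Claim_equal_get_num_reviewed := by
  intro results _ _
  unfold Spec_get_num_reviewed
  have hgk : ∀ f, ((pvG results f).length : Int) = pvK results f := by
    intro f; simp [pvG, pvK, pv_len_curNum]
  have hA : get_num_reviewed results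
      = (results.map Prod.fst).foldl (pvSel (pvG results)) [] := by
    rw [List.foldl_map, ← pv_step_merge (pvG results)]
    rfl
  have hmaxfold : PySem.List.max? (results.map Prod.fst)
        (fun f => ((pvQueriesOf_B results f).length : Int))
      = (results.map Prod.fst).foldl (pvMax (pvK results)) none := by
    unfold PySem.List.max?
    exact List.foldl_ext _ _ none (fun acc x _ => by cases acc <;> rfl)
  rw [hA]
  unfold get_num_reviewed_alt
  rw [hmaxfold]
  cases hmap : results.map Prod.fst with
  | nil => rfl
  | cons f t =>
      have h0 : pvSel (pvG results) [] f = pvG results f := by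
        unfold pvSel
        split
        · rfl
        · cases hgf : pvG results f <;> simp_all
      obtain ⟨b, hb⟩ := pv_max_some (pvK results) t f
      have hfold : (f :: t).foldl (pvMax (pvK results)) none
          = t.foldl (pvMax (pvK results)) (some f) := rfl
      rw [List.foldl_cons, h0, pv_argmax_go (pvG results) (pvK results) hgk, hfold, hb]
      simpa [pvG] using pv_pref_eq (pvQueriesOf_B results b) [] 0 rfl
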